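-- pv_equiv track=rewrite | github.com/Lucas-resende21/desenvolve-phyton-basico | modulo6/aula3_questao3.py | encontrar_intervalo_negativos
-- ===== SOURCE A (Python) =====
-- def encontrar_intervalo_negativos(lista):
--     max_negativos = 0
--     intervalo_inicial = 0
--     intervalo_final = 0
--
--     for i in range(len(lista)):
--         for j in range(i + 1, len(lista) + 1):
--             intervalo = lista[i:j]
--             quantidade_negativos = sum(1 for x in intervalo if x < 0)
--             if quantidade_negativos > max_negativos:
--                 max_negativos = quantidade_negativos
--                 intervalo_inicial, intervalo_final = i, j
--     return intervalo_inicial, intervalo_final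
-- ===== SOURCE B (Python) =====
-- def encontrar_intervalo_negativos(lista):
--     fim = 0
--     for k, x in enumerate(lista):
--         if x < 0:
--             fim = k + 1
--     return (0, fim)
-- ===== Notes on version B (the rewrite author's own statement) =====
-- stated objective: faster
-- what changed: Replaced the O(n^3) triple scan over all subarrays by a single forward pass recording last_negative_index+1 as the interval end (start is always 0), which is exactly where A's strictly-improving update rule last fires.
import Mathlib
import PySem

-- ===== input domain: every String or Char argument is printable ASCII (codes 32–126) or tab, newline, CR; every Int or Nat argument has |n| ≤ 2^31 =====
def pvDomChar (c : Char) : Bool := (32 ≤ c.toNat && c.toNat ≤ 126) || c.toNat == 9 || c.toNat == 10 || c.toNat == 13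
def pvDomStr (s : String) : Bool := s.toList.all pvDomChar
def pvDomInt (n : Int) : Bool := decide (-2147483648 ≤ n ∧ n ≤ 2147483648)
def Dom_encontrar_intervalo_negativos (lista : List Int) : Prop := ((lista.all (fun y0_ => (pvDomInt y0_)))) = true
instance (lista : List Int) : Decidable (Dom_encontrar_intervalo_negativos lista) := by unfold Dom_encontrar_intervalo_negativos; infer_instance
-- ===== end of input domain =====

-- B replaces A's O(n^3) all-subarrays scan by one forward pass keeping last_negative_index+1 (objective: faster).


-- ===== PORT A =====
def encontrar_intervalo_negativos (lista : List Int) : Int × Int :=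
  let n := PySem.List.len lista
  let st :=
    (PySem.List.pyRange 0 n 1).foldl (fun st i =>
      (PySem.List.pyRange (i + 1) (n + 1) 1).foldl (fun st j =>
        let intervalo := PySem.List.slice lista (some i) (some j)
        let quantidade_negativos : Int := ((intervalo.filter (fun x => decide (x < 0))).length : Int)
        if quantidade_negativos > st.1 then (quantidade_negativos, i, j) else st) st)
      ((0 : Int), (0 : Int), (0 : Int))
  (st.2.1, st.2.2)

-- ===== PORT B =====
def encontrar_intervalo_negativos_alt (lista : List Int) : Int × Int :=
  let fim := (PySem.List.enumerate lista 0).foldl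
      (fun fim kx => if kx.2 < 0 then kx.1 + 1 else fim) (0 : Int)
  (0, fim)

-- ===== PRECONDITION & SPEC =====
def Spec_encontrar_intervalo_negativos (lista : List Int) (out : Int × Int) : Prop := out = encontrar_intervalo_negativos_alt lista
instance (lista : List Int) (out : Int × Int) : Decidable (Spec_encontrar_intervalo_negativos lista out) := by unfold Spec_encontrar_intervalo_negativos; infer_instance

-- ===== CLAIM (what is proved, stated in full; the proofs are below) =====
def Claim_equal_encontrar_intervalo_negativos : Prop := ∀ (lista : List Int), Dom_encontrar_intervalo_negativos lista → Spec_encontrar_intervalo_negativos lista (encontrar_intervalo_negativos lista)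

-- ===== LEMMAS AND PROOFS =====

/-- Count of negatives, as A computes it for a slice. -/
def pvCnt (l : List Int) : Int := ((l.filter (fun x => decide (x < 0))).length : Int)

/-- B's running "fim" value. -/
def pvFim (l : List Int) : Int :=
  (PySem.List.enumerate l 0).foldl (fun fim kx => if kx.2 < 0 then kx.1 + 1 else fim) (0 : Int)

/-- A's inner-loop step for row i (state: (max, ini, fin)). -/
def pvStep (lista : List Int) (i : Int) (st : Int × Int × Int) (j : Int) : Int × Int × Int :=
  let intervalo := PySem.List.slice lista (some i) (some j)
  let q : Int := ((intervalo.filter (fun x => decide (x < 0))).length : Int)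
  if q > st.1 then (q, i, j) else st

lemma pvCnt_append (l : List Int) (x : Int) :
    pvCnt (l ++ [x]) = pvCnt l + (if x < 0 then 1 else 0) := by
  by_cases h : x < 0 <;> simp [pvCnt, List.filter_append, h]

lemma pvFim_append (l : List Int) (x : Int) :
    pvFim (l ++ [x]) = if x < 0 then (l.length : Int) + 1 else pvFim l := by
  by_cases h : x < 0 <;>
    simp [pvFim, PySem.List.enumerate_append, PySem.List.enumerate, List.foldl_append, h]

lemma pvFold_fix {α β : Type} (f : β → α → β) (st : β) :
    ∀ (l : List α), (∀ a ∈ l, f st a = st) → l.foldl f st = st := by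
  intro l
  induction l with
  | nil => intro _; rfl
  | cons a t ih =>
    intro h
    simp only [List.foldl_cons, h a (by simp)]
    exact ih (fun b hb => h b (by simp [hb]))

lemma pvCnt_sublist {l₁ l₂ : List Int} (h : l₁.Sublist l₂) : pvCnt l₁ ≤ pvCnt l₂ := by
  have := (h.filter (fun x => decide (x < 0))).length_le
  simpa [pvCnt] using Int.ofNat_le.mpr this

lemma pvCnt_slice_le (lista : List Int) (i j : Int) (hi : 0 ≤ i) (hj : 0 ≤ j) :
    pvCnt (PySem.List.slice lista (some i) (some j)) ≤ pvCnt lista := by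
  rw [PySem.List.slice_toNat lista hi hj]
  exact pvCnt_sublist (((lista.drop i.toNat).take_sublist _).trans (lista.drop_sublist _))

/-- Row i = 0 of A, processed up to j = m+1 starting from (0,0,0), gives
    (count of negatives in the first m elements, 0, B's fim of the first m elements). -/
lemma pvInner0 (lista : List Int) (m : Nat) (hm : m ≤ lista.length) :
    (PySem.List.pyRange 1 ((m : Int) + 1) 1).foldl (pvStep lista 0) ((0 : Int), (0 : Int), (0 : Int))
      = (pvCnt (lista.take m), 0, pvFim (lista.take m)) := by
  induction m with
  | zero => simp [PySem.List.pyRange_one_eq_nil, pvCnt, pvFim]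
  | succ m ih =>
    have hm' : m ≤ lista.length := Nat.le_of_succ_le hm
    have hlt : m < lista.length := hm
    have hsplit : PySem.List.pyRange 1 ((m : Int) + 1 + 1) 1
        = PySem.List.pyRange 1 ((m : Int) + 1) 1 ++ [(m : Int) + 1] := by
      exact PySem.List.pyRange_one_succ_right (by omega)
    have htake : lista.take (m + 1) = lista.take m ++ [lista[m]] :=
      List.take_succ_eq_append_getElem hlt
    have hslice : PySem.List.slice lista (some 0) (some ((m : Int) + 1)) = lista.take (m + 1) := by
      rw [PySem.List.slice_toNat lista (by omega) (by omega)]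
      norm_num
    have hlen : (lista.take m).length = m := List.length_take_of_le hm'
    push_cast
    rw [hsplit, List.foldl_append, ih hm']
    simp only [List.foldl_cons, List.foldl_nil, pvStep, hslice, htake]
    rw [show ((((lista.take m ++ [lista[m]]).filter (fun x => decide (x < 0))).length : Int))
        = pvCnt (lista.take m ++ [lista[m]]) from rfl]
    rw [pvCnt_append, pvFim_append, hlen]
    by_cases hneg : lista[m] < 0 <;> simp [hneg]

-- ===== VERDICT (by name: the statement is the Claim_ definition above) =====
theorem encontrar_intervalo_negativos_spec : Claim_equal_encontrar_intervalo_negativos := by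
  intro lista _
  show encontrar_intervalo_negativos lista = encontrar_intervalo_negativos_alt lista
  unfold encontrar_intervalo_negativos encontrar_intervalo_negativos_alt
  simp only [PySem.List.len_eq]
  rcases Nat.eq_zero_or_pos lista.length with h0 | hpos
  · rw [List.length_eq_zero_iff.mp h0]
    rfl
  -- split the outer range: 0 :: rest
  rw [PySem.List.pyRange_one_cons (by exact_mod_cast hpos), List.foldl_cons]
  have hrow0 : (PySem.List.pyRange (0 + 1) ((lista.length : Int) + 1) 1).foldl
      (fun st j =>
        let intervalo := PySem.List.slice lista (some 0) (some j)
        let quantidade_negativos : Int := ((intervalo.filter (fun x => decide (x < 0))).length : Int)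
        if quantidade_negativos > st.1 then (quantidade_negativos, (0 : Int), j) else st)
      ((0 : Int), (0 : Int), (0 : Int))
      = (pvCnt lista, 0, pvFim lista) := by
    have := pvInner0 lista lista.length (le_refl _)
    simpa [pvStep, List.take_length] using this
  rw [show (0 : Int) + 1 = 1 by norm_num] at hrow0 ⊢
  rw [hrow0]
  -- remaining rows (i ≥ 1) never improve on the total count of negatives
  have hfix : (PySem.List.pyRange 1 (lista.length : Int) 1).foldl
      (fun st i =>
        (PySem.List.pyRange (i + 1) ((lista.length : Int) + 1) 1).foldl
          (fun st j =>
            let intervalo := PySem.List.slice lista (some i) (some j)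
            let quantidade_negativos : Int := ((intervalo.filter (fun x => decide (x < 0))).length : Int)
            if quantidade_negativos > st.1 then (quantidade_negativos, i, j) else st) st)
      (pvCnt lista, 0, pvFim lista) = (pvCnt lista, 0, pvFim lista) := by
    apply pvFold_fix
    intro i hi
    have hi1 : 1 ≤ i := (PySem.List.mem_pyRange_one.mp hi).1
    apply pvFold_fix
    intro j hj
    have hj1 : i + 1 ≤ j := (PySem.List.mem_pyRange_one.mp hj).1
    have hle : pvCnt (PySem.List.slice lista (some i) (some j)) ≤ pvCnt lista :=
      pvCnt_slice_le lista i j (by omega) (by omega)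
    simp only [pvCnt] at hle ⊢
    rw [if_neg (by omega)]
  rw [hfix]
  rfl
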